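-- pv_equiv track=rewrite | github.com/CognitiveComputationLab/cogmods | ICCM2020/models/Ocf-Model/ocf_model.py | bitshifting
-- ===== SOURCE A (Python) =====
-- def bitshifting(bitlist):
--     """
--     bitwise shifts left one bit
--     :param bitlist: a list with 0 or 1 integer
--     :return:shifted list
--     """
--     n = len(bitlist) - 1
--     index = 0
--     found_zero = False
--     new_bitlist = bitlist[:]
--     if 0 not in new_bitlist:
--         return new_bitlist
--     while not found_zero:
--         if new_bitlist[n - index] == 0:
--             found_zero = True
--             new_bitlist[n - index] = 1
--         else:
--             if n - index == 0:
--                 break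
--             new_bitlist[n - index] = 0
--             index += 1
--     return new_bitlist
-- ===== SOURCE B (Python) =====
-- def bitshifting(bitlist):
--     """
--     bitwise shifts left one bit
--     :param bitlist: a list with 0 or 1 integer
--     :return: shifted list
--     """
--     # no zero anywhere: returned unchanged, as in the original
--     if 0 not in bitlist:
--         return bitlist[:]
--     # the increment flips the rightmost 0 to 1 and clears everything to its
--     # right; find that position once and rebuild the list by slicing.
--     n = len(bitlist)
--     j = n - 1 - bitlist[::-1].index(0)
--     return bitlist[:j] + [1] + [0] * (n - 1 - j)
-- ===== Notes on version B (the rewrite author's own statement) =====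
-- stated objective: alternative
-- what changed: Instead of A's destructive right-to-left carry scan that rewrites one cell per iteration, B locates the rightmost zero with a single reversed index() lookup and rebuilds the whole result non-destructively by slicing together the untouched prefix, a single one-bit and a run of trailing zeros.
import Mathlib
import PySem

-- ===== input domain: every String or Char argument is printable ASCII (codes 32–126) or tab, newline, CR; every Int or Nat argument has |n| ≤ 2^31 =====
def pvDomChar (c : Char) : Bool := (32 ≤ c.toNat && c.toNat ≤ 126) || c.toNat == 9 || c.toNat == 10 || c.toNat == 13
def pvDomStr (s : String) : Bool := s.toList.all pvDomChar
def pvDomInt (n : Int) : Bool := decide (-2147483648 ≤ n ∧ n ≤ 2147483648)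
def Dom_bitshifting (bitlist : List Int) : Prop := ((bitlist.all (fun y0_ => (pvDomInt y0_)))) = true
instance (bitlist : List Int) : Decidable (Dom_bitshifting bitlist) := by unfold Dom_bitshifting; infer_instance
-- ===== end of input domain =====

-- B replaces A's destructive right-to-left carry scan by one reversed index
-- lookup of the rightmost zero and a non-destructive slice-based rebuild;
-- the equivalence is about the return value only (A does not mutate its argument).

-- ===== PORT A =====
-- the while loop, scanning position p = n - index downwards; when 0 ∈ list the
-- accessed indices are always in range, so getD/set transcribe new_bitlist[n-index] exactly there
def bsLoop (lst : List Int) (p : Nat) : List Int :=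
  if lst.getD p 0 = 0 then lst.set p 1
  else if _hp : p = 0 then lst
  else bsLoop (lst.set p 0) (p - 1)
termination_by p
decreasing_by omega

def bitshifting (bitlist : List Int) : List Int :=
  if (0:Int) ∉ bitlist then bitlist
  else bsLoop bitlist (bitlist.length - 1)

-- ===== PORT B =====
-- bitlist[::-1] is PySem.List.slice? … (-1); .index(0) is PySem.List.index?; both
-- options are realised (guard ⇒ 0 is present), so the getD defaults are never used
def bitshifting_alt (bitlist : List Int) : List Int :=
  if (0:Int) ∉ bitlist then bitlist
  else
    let n : Int := bitlist.length
    let rev : List Int := (PySem.List.slice? bitlist none none (-1)).getD []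
    let j : Int := n - 1 - ((PySem.List.index? rev 0).getD 0 : Nat)
    PySem.List.slice bitlist none (some j) ++ [1] ++ List.replicate (n - 1 - j).toNat 0

-- ===== PRECONDITION & SPEC =====
def Spec_bitshifting (bitlist : List Int) (out : List Int) : Prop := out = bitshifting_alt bitlist
instance (bitlist : List Int) (out : List Int) : Decidable (Spec_bitshifting bitlist out) := by unfold Spec_bitshifting; infer_instance

-- ===== CLAIM (what is proved, stated in full; the proofs are below) =====
def Claim_equal_bitshifting : Prop := ∀ (bitlist : List Int), Dom_bitshifting bitlist → Spec_bitshifting bitlist (bitshifting bitlist)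

-- ===== LEMMAS AND PROOFS =====

lemma getD_append_add (l l' : List Int) (j : Nat) (d : Int) :
    (l ++ l').getD (l.length + j) d = l'.getD j d := by
  simp [List.getD, List.getElem?_append_right (by omega : l.length ≤ l.length + j)]

-- the carry loop turns pre ++ 0 :: (suf ++ tail), with no zero in suf, into
-- pre ++ 1 :: (0 … 0 ++ tail), scanning from position |pre| + |suf|
lemma bsLoop_spec (suf : List Int) (hs : (0:Int) ∉ suf) : ∀ (pre tail : List Int),
    bsLoop (pre ++ 0 :: (suf ++ tail)) (pre.length + suf.length)
      = pre ++ 1 :: (List.replicate suf.length 0 ++ tail) := by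
  induction suf using List.reverseRecOn with
  | nil =>
      intro pre tail
      rw [bsLoop]
      simp
  | append_singleton s a ih =>
      intro pre tail
      have ha : a ≠ 0 := by rintro rfl; exact hs (by simp)
      have hs' : (0:Int) ∉ s := fun h => hs (by simp [h])
      rw [bsLoop]
      have h1 : (pre ++ 0 :: ((s ++ [a]) ++ tail)).getD (pre.length + (s.length + 1)) 0 = a := by
        rw [getD_append_add]
        simp only [List.getD_cons_succ, List.append_assoc]
        rw [show s.length = s.length + 0 from rfl, getD_append_add s ([a] ++ tail) 0 0]
        simp
      have h2 : (pre ++ 0 :: ((s ++ [a]) ++ tail)).set (pre.length + (s.length + 1)) 0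
          = pre ++ 0 :: (s ++ (0 :: tail)) := by
        rw [List.set_append_right _ _ (by omega)]
        congr 1
        have : pre.length + (s.length + 1) - pre.length = s.length + 1 := by omega
        rw [this]
        simp
      simp only [List.length_append, List.length_singleton, h1, if_neg ha,
        dif_neg (by omega : ¬ (pre.length + (s.length + 1) = 0)), h2,
        (by omega : pre.length + (s.length + 1) - 1 = pre.length + s.length), ih hs' pre (0 :: tail)]
      simp [List.replicate_succ']

-- every list containing a zero splits around its RIGHTMOST zero
lemma decompose (l : List Int) (h0 : (0:Int) ∈ l) :
    ∃ pre suf, l = pre ++ 0 :: suf ∧ (0:Int) ∉ suf := by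
  induction l using List.reverseRecOn with
  | nil => simp at h0
  | append_singleton l a ih =>
      by_cases ha : a = 0
      · exact ⟨l, [], by simp [ha], by simp⟩
      · have h0' : (0:Int) ∈ l := by
          rcases List.mem_append.mp h0 with h | h
          · exact h
          · simp at h; exact absurd h.symm ha
        obtain ⟨pre, suf, hl, hsuf⟩ := ih h0'
        exact ⟨pre, suf ++ [a], by simp [hl], by
          intro h; rcases List.mem_append.mp h with h | h
          · exact hsuf h
          · simp at h; exact ha h.symm⟩

-- first occurrence of 0 in s ++ 0 :: r is at position |s| when 0 ∉ s
lemma index_mid (s r : List Int) (hs : (0:Int) ∉ s) :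
    PySem.List.index? (s ++ 0 :: r) 0 = some s.length := by
  induction s with
  | nil => exact PySem.List.index?_cons_self ..
  | cons x s ih =>
      have hx : x ≠ 0 := by rintro rfl; exact hs (by simp)
      have hs' : (0:Int) ∉ s := fun h => hs (by simp [h])
      rw [List.cons_append, PySem.List.index?_cons_of_ne _ hx, ih hs']
      simp

-- ===== VERDICT (by name: the statement is the Claim_ definition above) =====
theorem bitshifting_spec : Claim_equal_bitshifting := by
  intro l _
  unfold Spec_bitshifting bitshifting bitshifting_alt
  by_cases h0 : (0:Int) ∈ l
  · simp only [h0, not_true, if_false]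
    obtain ⟨pre, suf, hl, hsuf⟩ := decompose l h0
    have hA : bsLoop l (l.length - 1) = pre ++ 1 :: (List.replicate suf.length 0 ++ []) := by
      have hlen : l.length - 1 = pre.length + suf.length := by simp [hl]
      rw [hlen, hl, show (0:Int) :: suf = 0 :: (suf ++ []) from by simp]
      exact bsLoop_spec suf hsuf pre []
    rw [hA]
    have hrev : (PySem.List.slice? l none none (-1)).getD [] = l.reverse := by
      rw [PySem.List.slice?_none_none_neg_one]; rfl
    have hidx : PySem.List.index? l.reverse 0 = some suf.length := by
      rw [hl]
      simp only [List.reverse_append, List.reverse_cons]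
      rw [show suf.reverse ++ [(0:Int)] ++ pre.reverse = suf.reverse ++ 0 :: pre.reverse from by simp]
      rw [index_mid suf.reverse pre.reverse (by simpa using hsuf)]
      simp
    rw [hrev, hidx]
    have hlenl : (l.length : Int) = (pre.length : Int) + 1 + (suf.length : Int) := by
      simp [hl]; ring
    have hj : (l.length : Int) - 1 - ((some suf.length).getD 0 : Nat) = (pre.length : Int) := by
      simp [hlenl]; ring
    rw [hj]
    rw [show PySem.List.slice l none (some (pre.length : Int)) = l.take pre.length from
      PySem.List.slice_to_natCast l pre.length]
    have htake : l.take pre.length = pre := by rw [hl]; exact List.take_left ..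
    have hrep : ((l.length : Int) - 1 - (pre.length : Int)).toNat = suf.length := by
      rw [hlenl]; omega
    rw [htake, hrep]
    simp
  · simp [h0]
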